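-- pv_equiv track=rewrite | github.com/theperiperi/CP-Prep-Questions | Python/Array & String/1733. Minimum Number of People to Teach.py | minimumTeachings
-- ===== SOURCE A (Python) =====
-- def minimumTeachings(n, languages, friendships):
--
--     """
--     :type n: int
--     :type languages: List[List[int]]
--     :type friendships: List[List[int]]
--     :rtype: int
--     """
--
--     # Convert user languages to sets for O(1) lookup
--     user_langs = [set(l) for l in languages]
--
--     # Step 1: Identify users who can't communicate with at least one friend
--     need_help = set()
--     for u, v in friendships:
--         u -= 1  # Adjust to 0-based indexing
--         v -= 1
--         if user_langs[u].isdisjoint(user_langs[v]):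
--             need_help.add(u)
--             need_help.add(v)
--
--     # If all friends can communicate, no teaching is needed
--     if not need_help:
--         return 0
--
--     # Step 2: Count how many affected users know each language
--     lang_count = [0] * (n + 1)  # List indexed by language (1 to n)
--     for user in need_help:
--         for lang in user_langs[user]:
--             lang_count[lang] += 1
--
--     # Step 3: Find the language known by the most affected users
--     max_known = max(lang_count)
--
--     # Step 4: Calculate how many need to be taught this language
--     return len(need_help) - max_known
-- ===== SOURCE B (Python) =====
-- def minimumTeachings(n, languages, friendships):
--     user_langs = [set(l) for l in languages]
--
--     need_help = set()
--     for u, v in friendships: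
--         if user_langs[u - 1].isdisjoint(user_langs[v - 1]):
--             need_help.add(u - 1)
--             need_help.add(v - 1)
--
--     if not need_help:
--         return 0
--
--     # Try every language: teaching lang costs one lesson per affected user
--     # who does not already know it; keep the cheapest.
--     best = len(need_help)
--     for lang in range(1, n + 1):
--         cost = sum(1 for user in need_help if lang not in user_langs[user])
--         best = min(best, cost)
--     return best
-- ===== Notes on version B (the rewrite author's own statement) =====
-- stated objective: alternative
-- what changed: Replaces A's aggregation step (build a lang_count histogram over all languages of the affected users, then take its max) by a direct minimization: for each candidate language 1..n scan the affected users, count who would need teaching, and keep the cheapest; the histogram table and the max pass disappear.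
-- outside the precondition, e.g. on minimumTeachings(1, [[1], [1]], [[1, 2, 3]]): A raises ValueError, B raises ValueError; on minimumTeachings(2, [[-1], [2]], [[1, 2]]): A returns 0, B returns 1; on minimumTeachings(1, [[1], [3]], [[1, 2]]): A raises IndexError, B returns 1
import Mathlib
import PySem

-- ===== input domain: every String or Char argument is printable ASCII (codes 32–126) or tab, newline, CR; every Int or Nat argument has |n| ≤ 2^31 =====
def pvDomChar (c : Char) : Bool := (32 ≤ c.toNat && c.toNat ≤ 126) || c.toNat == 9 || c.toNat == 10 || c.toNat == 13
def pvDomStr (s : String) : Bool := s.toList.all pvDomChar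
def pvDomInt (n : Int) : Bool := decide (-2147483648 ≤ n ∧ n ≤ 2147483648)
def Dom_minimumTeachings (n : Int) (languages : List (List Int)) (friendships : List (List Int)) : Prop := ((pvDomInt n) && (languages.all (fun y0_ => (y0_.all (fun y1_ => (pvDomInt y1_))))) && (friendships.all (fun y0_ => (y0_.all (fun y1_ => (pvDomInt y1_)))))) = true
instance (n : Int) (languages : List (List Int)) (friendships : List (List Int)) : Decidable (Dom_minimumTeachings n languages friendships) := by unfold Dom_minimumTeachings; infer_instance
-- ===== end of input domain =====

-- B replaces A's histogram-then-max aggregation by a direct per-language minimization over the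
-- affected users (objective: alternative decomposition, similar cost).

-- ===== PORT A =====
-- user_langs = [set(l) for l in languages]  (shared line of both sources)
def pvUserLangs (languages : List (List Int)) : List (PySem.Set Int) :=
  languages.map (fun l => PySem.Set.ofList l)

-- A's step-1 loop: 'for u, v in friendships: u -= 1; v -= 1; if disjoint: add u; add v'.
-- Tuple unpacking is ported with pyGetD (exact when len(f) = 2, which Pre_ guarantees;
-- Python raises ValueError otherwise).
def pvNeedHelpA (user_langs : List (PySem.Set Int)) (friendships : List (List Int)) : PySem.Set Int :=
  friendships.foldl (fun s f =>
    let u := PySem.List.pyGetD f 0 0 - 1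
    let v := PySem.List.pyGetD f 1 0 - 1
    if PySem.Set.isdisjoint (PySem.List.pyGetD user_langs u PySem.Set.empty)
                            (PySem.List.pyGetD user_langs v PySem.Set.empty)
    then PySem.Set.add (PySem.Set.add s u) v
    else s) PySem.Set.empty

-- lang_count[lang] += 1 : exact where Python returns (-len ≤ lang < len; Pre_ guarantees
-- 1 ≤ lang ≤ n there); on an out-of-range index Python raises IndexError (excluded by Pre_).
def pvBump (l : List Int) (i : Int) : List Int :=
  match PySem.List.pyIdx? l.length i with
  | some j => l.set j (l.getD j 0 + 1)
  | none => l

def minimumTeachings (n : Int) (languages : List (List Int)) (friendships : List (List Int)) : Int :=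
  let user_langs := pvUserLangs languages
  let need_help := pvNeedHelpA user_langs friendships
  if need_help.isEmpty then 0
  else
    let lang_count := need_help.foldl (fun lc user =>
        (PySem.List.pyGetD user_langs user PySem.Set.empty).foldl (fun lc2 lang => pvBump lc2 lang) lc)
      (PySem.List.pyRepeat [0] (n + 1))
    -- max(lang_count): Python raises ValueError on an empty list; Pre_'s 0 ≤ n excludes that
    let max_known := (PySem.List.max? lang_count (fun x => x)).getD 0
    (PySem.Set.len need_help : Int) - max_known

-- ===== PORT B =====
-- B's step-1 loop (no index reassignment: u-1 / v-1 used inline)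
def pvNeedHelpB (user_langs : List (PySem.Set Int)) (friendships : List (List Int)) : PySem.Set Int :=
  friendships.foldl (fun s f =>
    let u := PySem.List.pyGetD f 0 0
    let v := PySem.List.pyGetD f 1 0
    if PySem.Set.isdisjoint (PySem.List.pyGetD user_langs (u - 1) PySem.Set.empty)
                            (PySem.List.pyGetD user_langs (v - 1) PySem.Set.empty)
    then PySem.Set.add (PySem.Set.add s (u - 1)) (v - 1)
    else s) PySem.Set.empty

def minimumTeachings_alt (n : Int) (languages : List (List Int)) (friendships : List (List Int)) : Int :=
  let user_langs := pvUserLangs languages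
  let need_help := pvNeedHelpB user_langs friendships
  if need_help.isEmpty then 0
  else
    (PySem.List.pyRange 1 (n + 1)).foldl (fun best lang =>
      -- cost = sum(1 for user in need_help if lang not in user_langs[user])
      let cost := need_help.foldl (fun c user =>
        if PySem.Set.contains (PySem.List.pyGetD user_langs user PySem.Set.empty) lang
        then c else c + 1) 0
      min best cost) (PySem.Set.len need_help)

-- ===== PRECONDITION & SPEC =====
-- Pre_ restricts to the problem's natural domain (LeetCode 1733): 0 ≤ n, each friendship is a
-- pair of valid (Python-indexable) user ids, and every language code lies in 1..n. It excludes
-- inputs where A raises (ValueError on a non-pair, IndexError on an out-of-range user or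
-- language code, ValueError of max() when n < 0) and out-of-domain language codes, on some of
-- which A still returns a value via negative-index wraparound of the histogram.
def Pre_minimumTeachings (n : Int) (languages : List (List Int)) (friendships : List (List Int)) : Prop :=
  friendships = [] ∨
  (0 ≤ n ∧
   (∀ f ∈ friendships, f.length = 2 ∧
       ∀ w ∈ f, 1 - (languages.length : Int) ≤ w ∧ w ≤ (languages.length : Int)) ∧
   (∀ row ∈ languages, ∀ lang ∈ row, 1 ≤ lang ∧ lang ≤ n))
instance (n : Int) (languages : List (List Int)) (friendships : List (List Int)) : Decidable (Pre_minimumTeachings n languages friendships) := by unfold Pre_minimumTeachings; infer_instance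

def pvWitness_minimumTeachings : Int × List (List Int) × List (List Int) :=
  (2, [[1], [2]], [[1, 2]])

def Spec_minimumTeachings (n : Int) (languages : List (List Int)) (friendships : List (List Int)) (out : Int) : Prop := out = minimumTeachings_alt n languages friendships
instance (n : Int) (languages : List (List Int)) (friendships : List (List Int)) (out : Int) : Decidable (Spec_minimumTeachings n languages friendships out) := by unfold Spec_minimumTeachings; infer_instance

-- ===== CLAIM (what is proved, stated in full; the proofs are below) =====
def Claim_equal_minimumTeachings : Prop := ∀ (n : Int) (languages : List (List Int)) (friendships : List (List Int)), Dom_minimumTeachings n languages friendships → Pre_minimumTeachings n languages friendships → Spec_minimumTeachings n languages friendships (minimumTeachings n languages friendships)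

-- ===== LEMMAS AND PROOFS =====

-- the set of languages user u knows, as both ports read it
def pvSetOf (user_langs : List (PySem.Set Int)) (u : Int) : PySem.Set Int :=
  PySem.List.pyGetD user_langs u PySem.Set.empty

-- number of affected users (in NH) who know language lang
def pvCI (user_langs : List (PySem.Set Int)) (NH : List Int) (lang : Int) : Int :=
  (NH.map (fun u => ((pvSetOf user_langs u).count lang : Int))).sum

-- the two step-1 loops compute the same set (they differ only in where "- 1" is applied)
theorem pvNeedHelp_eq (user_langs : List (PySem.Set Int)) (friendships : List (List Int)) :
    pvNeedHelpA user_langs friendships = pvNeedHelpB user_langs friendships := rfl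

theorem pvGetD_mem_or {α : Type} (xs : List α) (i : Int) (d : α) :
    PySem.List.pyGetD xs i d = d ∨ PySem.List.pyGetD xs i d ∈ xs := by
  unfold PySem.List.pyGetD PySem.List.pyGet?
  cases h : PySem.List.pyIdx? xs.length i with
  | none => simp
  | some k =>
    rw [Option.bind_some]
    cases hk : xs[k]? with
    | none => simp
    | some x =>
      right
      simp only [List.getElem?_eq_some_iff] at hk
      obtain ⟨h1, h2⟩ := hk; subst h2; exact List.getElem_mem _

theorem pvSetOf_nodup (languages : List (List Int)) (u : Int) :
    (pvSetOf (pvUserLangs languages) u).Nodup := by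
  rcases pvGetD_mem_or (pvUserLangs languages) u PySem.Set.empty with h | h
  · rw [pvSetOf] at *; rw [h]; exact List.nodup_nil
  · rcases List.mem_map.mp h with ⟨row, _, hrow⟩
    rw [pvSetOf, ← hrow]
    exact PySem.Set.nodup_ofList row

theorem pvSetOf_bounds (n : Int) (languages : List (List Int))
    (h : ∀ row ∈ languages, ∀ lang ∈ row, 1 ≤ lang ∧ lang ≤ n) (u : Int) :
    ∀ x ∈ pvSetOf (pvUserLangs languages) u, 1 ≤ x ∧ x ≤ n := by
  intro x hx
  rcases pvGetD_mem_or (pvUserLangs languages) u PySem.Set.empty with hm | hm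
  · rw [pvSetOf, hm] at hx; simp [PySem.Set.empty] at hx
  · rcases List.mem_map.mp hm with ⟨row, hrmem, hrow⟩
    rw [pvSetOf, ← hrow] at hx
    exact h row hrmem x ((PySem.Set.mem_ofList _ _).mp hx)

theorem pvBump_length (l : List Int) (i : Int) : (pvBump l i).length = l.length := by
  unfold pvBump; cases PySem.List.pyIdx? l.length i <;> simp

theorem pvBump_getD (l : List Int) (i : Int) (h0 : 0 ≤ i) (h1 : i < (l.length : Int)) (j : Nat) :
    (pvBump l i).getD j 0 = l.getD j 0 + (if (j : Int) = i then 1 else 0) := by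
  unfold pvBump PySem.List.pyIdx?
  rw [if_pos h0, if_pos h1]
  simp only [List.getD_eq_getElem?_getD, List.getElem?_set]
  by_cases hji : (j : Int) = i
  · have : i.toNat = j := by omega
    subst this
    rw [if_pos rfl, if_pos hji]
    have hlt : i.toNat < l.length := by omega
    simp [hlt]
  · have : ¬ (i.toNat = j) := by omega
    rw [if_neg this, if_neg hji]; ring

theorem pvInner_fold (n : Int) (ls : List Int) (hls : ∀ x ∈ ls, 1 ≤ x ∧ x ≤ n) :
    ∀ lc : List Int, lc.length = n.toNat + 1 →
      (ls.foldl (fun lc2 lang => pvBump lc2 lang) lc).length = n.toNat + 1 ∧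
      ∀ j : Nat, (ls.foldl (fun lc2 lang => pvBump lc2 lang) lc).getD j 0
        = lc.getD j 0 + (ls.count (j : Int) : Int) := by
  induction ls with
  | nil => intro lc hlen; simp [hlen]
  | cons x t ih =>
    intro lc hlen
    have hx := hls x (List.mem_cons_self)
    have hb0 : (0:Int) ≤ x := by omega
    have hb1 : x < (lc.length : Int) := by
      have h1 := hx.1; have h2 := hx.2; rw [hlen]; push_cast; omega
    have hlen' : (pvBump lc x).length = n.toNat + 1 := by rw [pvBump_length, hlen]
    obtain ⟨ihl, ihv⟩ := ih (fun y hy => hls y (List.mem_cons_of_mem _ hy)) (pvBump lc x) hlen'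
    refine ⟨by simpa using ihl, ?_⟩
    intro j
    rw [List.foldl_cons, ihv j, pvBump_getD lc x hb0 hb1 j, List.count_cons]
    by_cases hj : (j:Int) = x
    · rw [if_pos hj, if_pos (by simp [hj])]; push_cast; ring
    · rw [if_neg hj, if_neg (by simp; exact fun h => hj h.symm)]; push_cast; ring

theorem pvOuter_fold (n : Int) (languages : List (List Int))
    (h : ∀ row ∈ languages, ∀ lang ∈ row, 1 ≤ lang ∧ lang ≤ n) (NH : List Int) :
    ∀ lc : List Int, lc.length = n.toNat + 1 →
      (NH.foldl (fun lc user =>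
          (pvSetOf (pvUserLangs languages) user).foldl (fun lc2 lang => pvBump lc2 lang) lc) lc).length
        = n.toNat + 1 ∧
      ∀ j : Nat, (NH.foldl (fun lc user =>
          (pvSetOf (pvUserLangs languages) user).foldl (fun lc2 lang => pvBump lc2 lang) lc) lc).getD j 0
        = lc.getD j 0
          + (NH.map (fun u => ((pvSetOf (pvUserLangs languages) u).count (j : Int) : Int))).sum := by
  induction NH with
  | nil => intro lc hlen; simp [hlen]
  | cons u t ih =>
    intro lc hlen
    obtain ⟨il, iv⟩ := pvInner_fold n (pvSetOf (pvUserLangs languages) u)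
      (pvSetOf_bounds n languages h u) lc hlen
    obtain ⟨ol, ov⟩ := ih _ il
    refine ⟨by simpa using ol, ?_⟩
    intro j
    rw [List.foldl_cons, ov j, iv j, List.map_cons, List.sum_cons]
    ring

-- min/max duality of the two final folds
theorem pvMinMax (ls : List Int) (f : Int → Int) (L : Int) :
    ∀ a : Int, ls.foldl (fun b x => min b (L - f x)) (L - a)
      = L - ls.foldl (fun acc x => max acc (f x)) a := by
  induction ls with
  | nil => intro a; simp
  | cons x t ih =>
    intro a
    have : min (L - a) (L - f x) = L - max a (f x) := by omega
    simp only [List.foldl_cons, this, ih]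

-- B's per-language counting loop, in terms of pvCI
theorem pvCost (languages : List (List Int)) (NH : List Int) (lang : Int) :
    NH.foldl (fun c user =>
        if PySem.Set.contains (pvSetOf (pvUserLangs languages) user) lang then c else c + 1) (0:Int)
      = (NH.length : Int) - pvCI (pvUserLangs languages) NH lang := by
  rw [PySem.List.foldl_congr_mem _ _
        (fun c user => if ¬ (PySem.Set.contains (pvSetOf (pvUserLangs languages) user) lang = true)
                       then c + 1 else c) _
        (by intro c u _; by_cases hb : PySem.Set.contains (pvSetOf (pvUserLangs languages) u) lang <;> simp),
      PySem.List.foldl_ite_add_one]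
  have hci : pvCI (pvUserLangs languages) NH lang
      = (NH.countP (fun u => PySem.Set.contains (pvSetOf (pvUserLangs languages) u) lang) : Int) := by
    rw [pvCI, ← PySem.List.sum_map_ite_one_zero]
    congr 1
    apply List.map_congr_left
    intro u _
    rw [(pvSetOf_nodup languages u).count]
    by_cases hm : lang ∈ pvSetOf (pvUserLangs languages) u
    · rw [if_pos hm, if_pos ((PySem.Set.contains_iff _ _).mpr hm)]; rfl
    · rw [if_neg hm, if_neg (fun hc => hm ((PySem.Set.contains_iff _ _).mp hc))]; rfl
  rw [hci]
  have := List.length_eq_countP_add_countP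
    (fun u => PySem.Set.contains (pvSetOf (pvUserLangs languages) u) lang) (l := NH)
  have hc : NH.countP (fun u => decide ¬ (PySem.Set.contains (pvSetOf (pvUserLangs languages) u) lang = true))
      = NH.countP (fun u => decide ¬ ((fun u => PySem.Set.contains (pvSetOf (pvUserLangs languages) u) lang) u) = true) := rfl
  omega

-- a running max over range m, shifted by one, is the same loop over Python's range(1, m+1)
theorem pvRangeFold (g : Int → Int) (m : Nat) :
    ∀ a : Int, (List.range m).foldl (fun (acc : Int) (k : Nat) => max acc (g ((k:Int)+1))) a
      = (PySem.List.pyRange 1 ((m:Int)+1)).foldl (fun acc x => max acc (g x)) a := by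
  induction m with
  | zero => intro a; rfl
  | succ m ih =>
    intro a
    have h1 : ((m+1:Nat):Int) + 1 = ((m:Int)+1) + 1 := by push_cast; ring
    rw [List.range_succ, h1, PySem.List.pyRange_one_succ_right (by omega),
        List.foldl_append, List.foldl_append, ih]
    simp

-- the whole post-step-1 computation: A's histogram+max equals B's per-language minimization
theorem pvMain (n : Int) (languages : List (List Int)) (hn : 0 ≤ n)
    (hlang : ∀ row ∈ languages, ∀ lang ∈ row, 1 ≤ lang ∧ lang ≤ n) (NH : List Int) :
    (PySem.Set.len NH : Int)
      - (PySem.List.max? (NH.foldl (fun lc user =>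
            (pvSetOf (pvUserLangs languages) user).foldl (fun lc2 lang => pvBump lc2 lang) lc)
          (PySem.List.pyRepeat [0] (n+1))) (fun x => x)).getD 0
    = (PySem.List.pyRange 1 (n+1)).foldl (fun best lang =>
        min best (NH.foldl (fun c user =>
          if PySem.Set.contains (pvSetOf (pvUserLangs languages) user) lang then c else c + 1) 0))
        (PySem.Set.len NH) := by
  have hN : (n+1).toNat = n.toNat + 1 := by omega
  rw [PySem.List.pyRepeat_singleton, hN]
  obtain ⟨hlen, hval⟩ := pvOuter_fold n languages hlang NH (List.replicate (n.toNat+1) 0) (by simp)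
  have hrep : ∀ j : Nat, (List.replicate (n.toNat+1) (0:Int)).getD j 0 = 0 := by
    intro j
    by_cases hj : j < n.toNat + 1
    · exact List.getD_replicate _ hj
    · rw [List.getD_eq_getElem?_getD, List.getElem?_eq_none (by simpa using Nat.le_of_not_lt hj)]; rfl
  have hhist : (NH.foldl (fun lc user =>
        (pvSetOf (pvUserLangs languages) user).foldl (fun lc2 lang => pvBump lc2 lang) lc)
      (List.replicate (n.toNat+1) 0))
      = (List.range (n.toNat+1)).map (fun j : Nat => pvCI (pvUserLangs languages) NH (j:Int)) := by
    apply List.ext_getElem (by simp [hlen])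
    intro j h1 h2
    rw [← List.getD_eq_getElem _ 0 h1]
    simp only [List.getElem_map, List.getElem_range]
    rw [hval j, hrep j, pvCI]
    ring
  rw [hhist]
  have hzero : pvCI (pvUserLangs languages) NH (((0:Nat)):Int) = 0 := by
    rw [pvCI]
    apply List.sum_eq_zero
    intro x hx
    rcases List.mem_map.mp hx with ⟨u, _, hu⟩
    rw [← hu, List.count_eq_zero.mpr]
    · rfl
    · intro hmem
      have := (pvSetOf_bounds n languages hlang u _ hmem).1
      omega
  have hA : (PySem.List.max? ((List.range (n.toNat+1)).map
        (fun j : Nat => pvCI (pvUserLangs languages) NH (j:Int))) (fun x => x)).getD 0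
      = (PySem.List.pyRange 1 (n+1)).foldl
          (fun acc x => max acc (pvCI (pvUserLangs languages) NH x)) 0 := by
    rw [List.range_succ_eq_map, List.map_cons, List.map_map, PySem.List.max?_id_cons,
        Option.getD_some, List.foldl_map, hzero]
    rw [PySem.List.foldl_congr_mem _ _
          (fun (acc : Int) (k : Nat) => max acc (pvCI (pvUserLangs languages) NH ((k:Int)+1))) _
          (by intro acc k _
              have hsk : ((Nat.succ k : Nat) : Int) = (k:Int)+1 := by push_cast; ring
              simp only [Function.comp_apply, hsk])]
    have := pvRangeFold (pvCI (pvUserLangs languages) NH) n.toNat 0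
    rw [Int.toNat_of_nonneg hn] at this
    exact this
  rw [hA]
  have hbody : (PySem.List.pyRange 1 (n+1)).foldl (fun best lang =>
        min best (NH.foldl (fun c user =>
          if PySem.Set.contains (pvSetOf (pvUserLangs languages) user) lang then c else c + 1) 0))
        (PySem.Set.len NH)
      = (PySem.List.pyRange 1 (n+1)).foldl (fun best lang =>
          min best ((PySem.Set.len NH : Int) - pvCI (pvUserLangs languages) NH lang))
        (PySem.Set.len NH) := by
    apply PySem.List.foldl_congr_mem
    intro acc lang _
    rw [pvCost]; rfl
  rw [hbody]
  have hmm := pvMinMax (PySem.List.pyRange 1 (n+1)) (pvCI (pvUserLangs languages) NH)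
    (PySem.Set.len NH) 0
  rw [sub_zero] at hmm
  exact hmm.symm

-- ===== VERDICT (by name: the statement is the Claim_ definition above) =====
theorem minimumTeachings_spec : Claim_equal_minimumTeachings := by
  intro n languages friendships _ hpre
  rcases hpre with hnil | ⟨hn, hfr, hlang⟩
  · subst hnil; rfl
  show minimumTeachings n languages friendships = minimumTeachings_alt n languages friendships
  simp only [minimumTeachings, minimumTeachings_alt, ← pvNeedHelp_eq]
  by_cases hemp : (pvNeedHelpA (pvUserLangs languages) friendships).isEmpty
  · simp only [hemp, if_pos]
  · simp only [hemp, Bool.false_eq_true]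
    exact pvMain n languages hn hlang (pvNeedHelpA (pvUserLangs languages) friendships)
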